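-- pv_equiv track=rewrite | github.com/ayaan-cs/LaLigaTL | tier_calculator.py | _balance_tiers
-- ===== SOURCE A (Python) =====
-- def _balance_tiers(tiers, sorted_teams):
--     """Ensure balanced tier distribution"""
--     # Count teams in each tier
--     tier_counts = {'S': 0, 'A': 0, 'B': 0, 'C': 0, 'D': 0}
--     for tier in tiers.values():
--         tier_counts[tier] += 1
--
--     # Ideal distribution for 20 teams
--     ideal_distribution = {'S': 3, 'A': 4, 'B': 5, 'C': 5, 'D': 3}
--
--     # Rebalance if necessary
--     balanced_tiers = {}
--     tier_order = ['S', 'A', 'B', 'C', 'D']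
--     current_counts = {'S': 0, 'A': 0, 'B': 0, 'C': 0, 'D': 0}
--
--     for team, score in sorted_teams:
--         assigned = False
--         for tier in tier_order:
--             if current_counts[tier] < ideal_distribution[tier]:
--                 balanced_tiers[team] = tier
--                 current_counts[tier] += 1
--                 assigned = True
--                 break
--
--         if not assigned:
--             # Fill remaining teams in the last available tier
--             for tier in reversed(tier_order):
--                 if current_counts[tier] < ideal_distribution[tier]:
--                     balanced_tiers[team] = tier
--                     current_counts[tier] += 1
--                     break
--
--     return balanced_tiers
-- ===== SOURCE B (Python) =====
-- def _balance_tiers(tiers, sorted_teams):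
--     """Ensure balanced tier distribution"""
--     tier_seq = ['S'] * 3 + ['A'] * 4 + ['B'] * 5 + ['C'] * 5 + ['D'] * 3
--     return {team: tier for (team, _score), tier in zip(sorted_teams, tier_seq)}
-- ===== Notes on version B (the rewrite author's own statement) =====
-- stated objective: simpler
-- what changed: Replaces the per-team inner capacity scans over two running count dicts (plus an unreachable reversed fallback scan) with one zip of the sorted teams against the fixed 20-label sequence ['S']*3+['A']*4+['B']*5+['C']*5+['D']*3, built into a dict comprehension; the dead tier-counting loop (observable only as a KeyError, excluded by Pre_) is dropped.
import Mathlib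
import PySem

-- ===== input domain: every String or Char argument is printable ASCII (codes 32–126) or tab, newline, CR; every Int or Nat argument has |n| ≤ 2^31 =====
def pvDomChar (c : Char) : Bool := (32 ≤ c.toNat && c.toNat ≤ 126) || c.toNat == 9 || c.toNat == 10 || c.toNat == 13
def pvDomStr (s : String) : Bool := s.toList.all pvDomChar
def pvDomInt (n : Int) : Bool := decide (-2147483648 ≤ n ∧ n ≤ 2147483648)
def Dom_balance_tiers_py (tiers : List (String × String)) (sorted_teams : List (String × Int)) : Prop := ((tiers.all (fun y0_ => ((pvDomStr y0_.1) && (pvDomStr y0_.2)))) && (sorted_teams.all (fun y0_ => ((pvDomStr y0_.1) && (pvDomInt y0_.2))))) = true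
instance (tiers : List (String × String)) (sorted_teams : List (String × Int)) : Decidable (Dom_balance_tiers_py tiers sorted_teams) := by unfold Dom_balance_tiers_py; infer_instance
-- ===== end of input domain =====

-- B replaces A's per-team capacity scans over running count dicts with one zip of the
-- sorted teams against the fixed 20-label sequence (simpler; return value only).


-- ===== PORT A =====
def pvIdeal : PySem.Dict String Int :=
  PySem.Dict.ofList [("S", 3), ("A", 4), ("B", 5), ("C", 5), ("D", 3)]

def pvZeroCounts : PySem.Dict String Int :=
  PySem.Dict.ofList [("S", 0), ("A", 0), ("B", 0), ("C", 0), ("D", 0)]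

-- inner 'for tier in <order>: if current_counts[tier] < ideal_distribution[tier]: … break'
def pvFindTier : List String → PySem.Dict String Int → Option String
  | [], _ => none
  | t :: rest, counts =>
    if counts.getD t 0 < pvIdeal.getD t 0 then some t else pvFindTier rest counts

-- body of 'for team, score in sorted_teams' (state = (balanced_tiers, current_counts))
def pvAStep (st : PySem.Dict String String × PySem.Dict String Int) (p : String × Int) :
    PySem.Dict String String × PySem.Dict String Int :=
  match pvFindTier ["S", "A", "B", "C", "D"] st.2 with
  | some t => (st.1.insert p.1 t, st.2.insert t (st.2.getD t 0 + 1))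
  | none =>
    -- 'if not assigned: for tier in reversed(tier_order): …'
    match pvFindTier (["S", "A", "B", "C", "D"].reverse) st.2 with
    | some t => (st.1.insert p.1 t, st.2.insert t (st.2.getD t 0 + 1))
    | none => st

def balance_tiers_py (tiers : List (String × String)) (sorted_teams : List (String × Int)) : List (String × String) :=
  -- 'for tier in tiers.values(): tier_counts[tier] += 1' — dead afterwards; its KeyError
  -- (a value outside the five labels) is excluded by Pre_, where getD is exact.
  let _tier_counts := (PySem.Dict.ofList tiers).values.foldl
      (fun d v => d.insert v (d.getD v 0 + 1)) pvZeroCounts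
  ((sorted_teams.foldl pvAStep ((PySem.Dict.empty : PySem.Dict String String), pvZeroCounts)).1).items

-- ===== PORT B =====
def balance_tiers_py_alt (tiers : List (String × String)) (sorted_teams : List (String × Int)) : List (String × String) :=
  let tier_seq := List.replicate 3 "S" ++ List.replicate 4 "A" ++ List.replicate 5 "B"
      ++ List.replicate 5 "C" ++ List.replicate 3 "D"
  ((List.zip sorted_teams tier_seq).foldl
      (fun d p => d.insert p.1.1 p.2) (PySem.Dict.empty : PySem.Dict String String)).items

-- ===== PRECONDITION & SPEC =====
-- Pre_ excludes exactly the inputs where A raises KeyError: a value of the tiers dict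
-- outside the five tier labels.
def Pre_balance_tiers_py (tiers : List (String × String)) (sorted_teams : List (String × Int)) : Prop :=
  ∀ v ∈ (PySem.Dict.ofList tiers).values, v ∈ (["S", "A", "B", "C", "D"] : List String)
instance (tiers : List (String × String)) (sorted_teams : List (String × Int)) : Decidable (Pre_balance_tiers_py tiers sorted_teams) := by unfold Pre_balance_tiers_py; infer_instance

def pvWitness_balance_tiers_py : (List (String × String)) × (List (String × Int)) :=
  ([("Barcelona", "S"), ("Getafe", "C")], [("Madrid", 90), ("Barcelona", 88)])

def Spec_balance_tiers_py (tiers : List (String × String)) (sorted_teams : List (String × Int)) (out : List (String × String)) : Prop := out = balance_tiers_py_alt tiers sorted_teams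
instance (tiers : List (String × String)) (sorted_teams : List (String × Int)) (out : List (String × String)) : Decidable (Spec_balance_tiers_py tiers sorted_teams out) := by unfold Spec_balance_tiers_py; infer_instance

-- ===== CLAIM (what is proved, stated in full; the proofs are below) =====
def Claim_equal_balance_tiers_py : Prop := ∀ (tiers : List (String × String)) (sorted_teams : List (String × Int)), Dom_balance_tiers_py tiers sorted_teams → Pre_balance_tiers_py tiers sorted_teams → Spec_balance_tiers_py tiers sorted_teams (balance_tiers_py tiers sorted_teams)

-- ===== LEMMAS AND PROOFS =====

-- the label sequence B builds
def pvSeq : List String :=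
  List.replicate 3 "S" ++ List.replicate 4 "A" ++ List.replicate 5 "B"
    ++ List.replicate 5 "C" ++ List.replicate 3 "D"

-- label A's inner scan picks when n teams have been assigned so far
def pvLabelOf (n : Nat) : String :=
  if n < 3 then "S" else if n < 7 then "A" else if n < 12 then "B"
  else if n < 17 then "C" else "D"

-- current_counts after n assignments
def pvCountsOf (n : Nat) : PySem.Dict String Int :=
  PySem.Dict.ofList [("S", ((min n 3 : Nat) : Int)), ("A", ((min (n - 3) 4 : Nat) : Int)),
    ("B", ((min (n - 7) 5 : Nat) : Int)), ("C", ((min (n - 12) 5 : Nat) : Int)),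
    ("D", ((min (n - 17) 3 : Nat) : Int))]

theorem pvCountsOf_zero : pvCountsOf 0 = pvZeroCounts := by decide

theorem pvSeq_drop (n : Nat) (hn : n < 20) :
    pvSeq.drop n = pvLabelOf n :: pvSeq.drop (n + 1) := by
  interval_cases n <;> rfl

theorem pvAStep_lt (n : Nat) (hn : n < 20) (acc : PySem.Dict String String) (p : String × Int) :
    pvAStep (acc, pvCountsOf n) p = (acc.insert p.1 (pvLabelOf n), pvCountsOf (n + 1)) := by
  interval_cases n <;> rfl

theorem pvAStep_full (acc : PySem.Dict String String) (p : String × Int) :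
    pvAStep (acc, pvCountsOf 20) p = (acc, pvCountsOf 20) := by rfl

theorem pvMain (ts : List (String × Int)) (acc : PySem.Dict String String) (n : Nat)
    (hn : n ≤ 20) :
    (ts.foldl pvAStep (acc, pvCountsOf n)).1
      = (List.zip ts (pvSeq.drop n)).foldl (fun d p => d.insert p.1.1 p.2) acc := by
  induction ts generalizing acc n with
  | nil => cases pvSeq.drop n <;> rfl
  | cons t ts ih =>
    by_cases h : n < 20
    · rw [List.foldl_cons, pvAStep_lt n h, pvSeq_drop n h]
      exact ih _ (n + 1) (by omega)
    · have h20 : n = 20 := by omega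
      subst h20
      have hdrop : pvSeq.drop 20 = [] := rfl
      rw [List.foldl_cons, pvAStep_full, hdrop]
      have := ih acc 20 (by omega)
      rw [hdrop] at this
      simpa [List.zip_nil_right] using this

-- ===== VERDICT (by name: the statement is the Claim_ definition above) =====
theorem balance_tiers_py_spec : Claim_equal_balance_tiers_py := by
  intro tiers sorted_teams _hd _hp
  unfold Spec_balance_tiers_py balance_tiers_py balance_tiers_py_alt
  have h := pvMain sorted_teams PySem.Dict.empty 0 (by omega)
  rw [pvCountsOf_zero] at h
  simp only [List.drop_zero] at h
  rw [h]
  rfl
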